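-- pv_equiv track=rewrite | github.com/miliar/Code_Jam_Webscraper | Solutions_python/Problem_35/334.py | alpha_sinks
-- ===== SOURCE A (Python) =====
-- letters = "abcdefghijklmnopqrstuvwxyz"
--
-- def alpha_sinks(mat=[[1,2],[1,2]]):
--   mat_H = len(mat)
--   mat_W = len(mat[0])
--   mat_s = []
--   letter_ctr = 0
--   d_l = {}
--   for i in range(mat_H):
--     s_list = []
--     for j in range(mat_W):
--       pos_i = " "
--       #print mat[i][j]
--       if mat[i][j] not in d_l.keys():
--         d_l[mat[i][j]] = letters[letter_ctr]
--         pos_i = letters[letter_ctr]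
--         letter_ctr+=1
--       else:
--         pos_i = d_l[mat[i][j]]
--       s_list += [pos_i]
--     mat_s += [s_list]
--   return(mat_s)
-- ===== SOURCE B (Python) =====
-- letters = "abcdefghijklmnopqrstuvwxyz"
--
-- def alpha_sinks(mat=[[1,2],[1,2]]):
--   mW = len(mat[0])
--   cells = [row[j] for row in mat for j in range(mW)]
--   order = []
--   for v in cells:
--     if v not in order:
--       order.append(v)
--   return [[letters[order.index(v)] for v in cells[i * mW:(i + 1) * mW]]
--           for i in range(len(mat))]
-- ===== Notes on version B (the rewrite author's own statement) =====
-- stated objective: alternative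
-- what changed: B drops A's dict-and-counter state entirely: it flattens the read cells into one list, dedups it into a first-appearance order list, and emits the grid by slicing the flat list back into rows, labelling each value as letters[order.index(v)].
import Mathlib
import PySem

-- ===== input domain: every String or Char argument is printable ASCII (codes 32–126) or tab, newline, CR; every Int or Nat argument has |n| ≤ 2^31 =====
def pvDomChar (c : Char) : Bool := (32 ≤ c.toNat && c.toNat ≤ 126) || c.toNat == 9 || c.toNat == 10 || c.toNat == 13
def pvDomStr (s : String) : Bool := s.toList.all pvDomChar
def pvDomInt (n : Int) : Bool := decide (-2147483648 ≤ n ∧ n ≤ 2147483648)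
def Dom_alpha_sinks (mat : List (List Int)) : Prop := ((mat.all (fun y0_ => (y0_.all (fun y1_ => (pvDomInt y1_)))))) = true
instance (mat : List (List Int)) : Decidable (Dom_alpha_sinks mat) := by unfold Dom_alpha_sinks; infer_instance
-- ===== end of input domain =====

-- B replaces A's dict-and-counter loop by: flatten the read cells, dedup them into a
-- first-appearance order list, and emit the grid by slicing the flat cell list back into
-- rows and looking each value's letter up as letters[order.index(v)]; return values proved equal on Pre_.

-- the module constant `letters` and the 1-char string letters[i] (shared context of both Pythons)
def pvLetters : String := "abcdefghijklmnopqrstuvwxyz"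

def pvChar (i : Int) : String :=
  ((PySem.Str.pyGet? pvLetters i).map (fun c => String.ofList [c])).getD ""

-- letters[order.index(v)] (Source B's lookup; order.index raises only outside Pre_)
def pvLook (order : List Int) (v : Int) : String :=
  pvChar (((PySem.List.index? order v).getD 0 : Nat) : Int)

-- ===== PORT A =====
def alpha_sinks (mat : List (List Int)) : List (List String) :=
  let mat_H : Int := mat.length
  let mat_W : Int := ((PySem.List.pyGet? mat 0).getD []).length
  let res := (PySem.List.pyRange 0 mat_H 1).foldl
    (fun (st : List (List String) × Int × PySem.Dict Int String) i =>
      let inner := (PySem.List.pyRange 0 mat_W 1).foldl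
        (fun (st2 : List String × Int × PySem.Dict Int String) j =>
          let v := PySem.List.pyGetD (PySem.List.pyGetD mat i []) j 0
          if st2.2.2.contains v = false then
            (st2.1 ++ [pvChar st2.2.1], st2.2.1 + 1, st2.2.2.insert v (pvChar st2.2.1))
          else
            (st2.1 ++ [st2.2.2.getD v ""], st2.2.1, st2.2.2))
        ([], st.2.1, st.2.2)
      (st.1 ++ [inner.1], inner.2.1, inner.2.2))
    ([], 0, PySem.Dict.empty)
  res.1

-- ===== PORT B =====
def alpha_sinks_alt (mat : List (List Int)) : List (List String) :=
  let mW : Int := ((PySem.List.pyGet? mat 0).getD []).length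
  let cells := mat.flatMap (fun row =>
    (PySem.List.pyRange 0 mW 1).map (fun j => PySem.List.pyGetD row j 0))
  let order := cells.foldl (fun acc v => if v ∈ acc then acc else acc ++ [v]) []
  (PySem.List.pyRange 0 (mat.length : Int) 1).map (fun i =>
    (PySem.List.slice cells (some (i * mW)) (some ((i + 1) * mW))).map
      (fun v => pvLook order v))

-- ===== PRECONDITION & SPEC =====
-- Pre_ excludes exactly the inputs where A raises IndexError: the empty matrix (mat[0]),
-- a row shorter than the first row (mat[i][j]), and more than 26 distinct values among the
-- read cells (letters[letter_ctr]).
def Pre_alpha_sinks (mat : List (List Int)) : Prop :=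
  mat ≠ [] ∧
  (∀ row ∈ mat, (mat.headD []).length ≤ row.length) ∧
  (PySem.List.dedup (mat.flatMap (fun row => row.take (mat.headD []).length))).length ≤ 26

instance (mat : List (List Int)) : Decidable (Pre_alpha_sinks mat) := by
  unfold Pre_alpha_sinks; infer_instance

def pvWitness_alpha_sinks : List (List Int) := [[1, 2], [1, 2]]

def Spec_alpha_sinks (mat : List (List Int)) (out : List (List String)) : Prop := out = alpha_sinks_alt mat
instance (mat : List (List Int)) (out : List (List String)) : Decidable (Spec_alpha_sinks mat out) := by unfold Spec_alpha_sinks; infer_instance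

-- ===== CLAIM (what is proved, stated in full; the proofs are below) =====
def Claim_equal_alpha_sinks : Prop := ∀ (mat : List (List Int)), Dom_alpha_sinks mat → Pre_alpha_sinks mat → Spec_alpha_sinks mat (alpha_sinks mat)

-- ===== LEMMAS AND PROOFS =====

-- B's dedup step and fold
def pvDstep (l : List Int) (v : Int) : List Int := if v ∈ l then l else l ++ [v]
def pvDl (vs l : List Int) : List Int := vs.foldl pvDstep l

-- the dict A has built after first-seeing exactly the values of l (in that order)
def pvDictOf (l : List Int) : PySem.Dict Int String :=
  l.zipIdx.foldl (fun d p => d.insert p.1 (pvChar p.2)) PySem.Dict.empty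

-- A's per-cell step (output cell, counter, dict)
def pvCellA (st : List String × Int × PySem.Dict Int String) (v : Int) :
    List String × Int × PySem.Dict Int String :=
  if st.2.2.contains v = false then
    (st.1 ++ [pvChar st.2.1], st.2.1 + 1, st.2.2.insert v (pvChar st.2.1))
  else
    (st.1 ++ [st.2.2.getD v ""], st.2.1, st.2.2)

def pvRowA (st : List (List String) × Int × PySem.Dict Int String) (row : List Int) :
    List (List String) × Int × PySem.Dict Int String :=
  let inner := row.foldl pvCellA ([], st.2.1, st.2.2)
  (st.1 ++ [inner.1], inner.2.1, inner.2.2)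

lemma pvDictOf_snoc (l : List Int) (v : Int) :
    pvDictOf (l ++ [v]) = (pvDictOf l).insert v (pvChar l.length) := by
  unfold pvDictOf
  rw [List.zipIdx_append, List.foldl_append]
  simp [List.zipIdx]

lemma pvContains_dictOf (l : List Int) (v : Int) :
    (pvDictOf l).contains v = decide (v ∈ l) := by
  induction l using List.reverseRecOn with
  | nil => simp [pvDictOf, PySem.Dict.contains_empty]
  | append_singleton l x ih =>
    rw [pvDictOf_snoc, PySem.Dict.contains_insert, ih]
    by_cases h : v = x <;> simp [h]

lemma pvGetD_dictOf (l : List Int) (hl : l.Nodup) (v : Int) (hv : v ∈ l) :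
    (pvDictOf l).getD v "" = pvLook l v := by
  induction l using List.reverseRecOn with
  | nil => cases hv
  | append_singleton l x ih =>
    have hx : x ∉ l := by
      intro hm
      exact (List.disjoint_of_nodup_append hl) hm (by simp)
    have hl' : l.Nodup := (List.nodup_append.mp hl).1
    rw [pvDictOf_snoc, PySem.Dict.getD_insert]
    by_cases h : v = x
    · subst h
      rw [if_pos rfl]
      unfold pvLook
      rw [PySem.List.index?_append_singleton_self l v hx]
      rfl
    · rw [if_neg h]
      rcases List.mem_append.mp hv with h1 | h1
      · rw [ih hl' h1]
        unfold pvLook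
        rw [PySem.List.index?_append_of_mem _ h1]
      · simp at h1; exact absurd h1 h

lemma pvDstep_nodup (l : List Int) (v : Int) (h : l.Nodup) : (pvDstep l v).Nodup := by
  unfold pvDstep
  split
  · exact h
  · rename_i hv
    exact List.Nodup.append h (List.nodup_singleton v)
      (fun a ha hb => hv ((List.mem_singleton.mp hb) ▸ ha))

lemma pvDl_nodup (vs l : List Int) (h : l.Nodup) : (pvDl vs l).Nodup := by
  induction vs generalizing l with
  | nil => exact h
  | cons v vs ih => exact ih _ (pvDstep_nodup l v h)

lemma pvMem_dstep_self (l : List Int) (v : Int) : v ∈ pvDstep l v := by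
  unfold pvDstep; split <;> simp [*]

lemma pvDl_prefix (vs l : List Int) : ∃ t, pvDl vs l = l ++ t := by
  induction vs generalizing l with
  | nil => exact ⟨[], by simp [pvDl]⟩
  | cons v vs ih =>
    obtain ⟨t, ht⟩ := ih (pvDstep l v)
    have hd : pvDl (v :: vs) l = pvDl vs (pvDstep l v) := rfl
    by_cases h : v ∈ l
    · refine ⟨t, ?_⟩
      rw [hd, ht]
      simp [pvDstep, h]
    · refine ⟨v :: t, ?_⟩
      rw [hd, ht]
      simp [pvDstep, h]

lemma pvLook_extend (vs l : List Int) (v : Int) (hv : v ∈ l) :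
    pvLook (pvDl vs l) v = pvLook l v := by
  obtain ⟨t, ht⟩ := pvDl_prefix vs l
  unfold pvLook
  rw [ht, PySem.List.index?_append_of_mem _ hv]

lemma pvCellA_eq (acc : List String) (l : List Int) (hl : l.Nodup) (v : Int) :
    pvCellA (acc, (l.length : Int), pvDictOf l) v
      = (acc ++ [pvLook (pvDstep l v) v], ((pvDstep l v).length : Int), pvDictOf (pvDstep l v)) := by
  unfold pvCellA pvDstep
  dsimp only
  by_cases h : v ∈ l
  · rw [if_neg (by simp [pvContains_dictOf, h]), if_pos h]
    simp [pvGetD_dictOf l hl v h]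
  · rw [if_pos (by simp [pvContains_dictOf, h]), if_neg h]
    rw [pvDictOf_snoc]
    unfold pvLook
    rw [PySem.List.index?_append_singleton_self l v h]
    simp

lemma pvRow (vs rest : List Int) (acc : List String) (l : List Int) (hl : l.Nodup) :
    vs.foldl pvCellA (acc, (l.length : Int), pvDictOf l)
      = (acc ++ vs.map (fun v => pvLook (pvDl (vs ++ rest) l) v),
         ((pvDl vs l).length : Int), pvDictOf (pvDl vs l)) := by
  induction vs generalizing acc l with
  | nil => simp [pvDl]
  | cons v vs ih =>
    have hstep := pvCellA_eq acc l hl v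
    have hl' := pvDstep_nodup l v hl
    calc (v :: vs).foldl pvCellA (acc, (l.length : Int), pvDictOf l)
        = vs.foldl pvCellA (acc ++ [pvLook (pvDstep l v) v],
            ((pvDstep l v).length : Int), pvDictOf (pvDstep l v)) := by
          rw [List.foldl_cons, hstep]
      _ = _ := by
          rw [ih _ _ hl']
          have h1 : pvDl (vs ++ rest) (pvDstep l v) = pvDl ((v :: vs) ++ rest) l := rfl
          have h2 : pvDl vs (pvDstep l v) = pvDl (v :: vs) l := rfl
          have h3 : pvLook (pvDstep l v) v = pvLook (pvDl ((v :: vs) ++ rest) l) v := by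
            rw [← h1, pvLook_extend _ _ _ (pvMem_dstep_self l v)]
          rw [h1, h2, h3, List.map_cons]
          simp

lemma pvMat (rows : List (List Int)) (rest : List Int) (acc : List (List String))
    (l : List Int) (hl : l.Nodup) :
    rows.foldl pvRowA (acc, (l.length : Int), pvDictOf l)
      = (acc ++ rows.map (fun row => row.map
            (fun v => pvLook (pvDl (rows.flatten ++ rest) l) v)),
         ((pvDl rows.flatten l).length : Int), pvDictOf (pvDl rows.flatten l)) := by
  induction rows generalizing acc l with
  | nil => simp [pvDl]
  | cons r rows ih =>
    have hstep : pvRowA (acc, (l.length : Int), pvDictOf l) r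
        = (acc ++ [r.map (fun v => pvLook (pvDl ((r :: rows).flatten ++ rest) l) v)],
           ((pvDl r l).length : Int), pvDictOf (pvDl r l)) := by
      unfold pvRowA
      rw [pvRow r (rows.flatten ++ rest) [] l hl]
      have : pvDl (r ++ (rows.flatten ++ rest)) l = pvDl ((r :: rows).flatten ++ rest) l := by
        simp [pvDl]
      rw [this]
      simp
    have hl' : (pvDl r l).Nodup := pvDl_nodup r l hl
    have hb : pvDl (rows.flatten ++ rest) (pvDl r l) = pvDl ((r :: rows).flatten ++ rest) l := by
      simp [pvDl, List.foldl_append]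
    have hb2 : pvDl rows.flatten (pvDl r l) = pvDl (r :: rows).flatten l := by
      simp [pvDl, List.foldl_append]
    calc (r :: rows).foldl pvRowA (acc, (l.length : Int), pvDictOf l)
        = rows.foldl pvRowA (pvRowA (acc, (l.length : Int), pvDictOf l) r) := rfl
      _ = _ := by
          rw [hstep, ih _ _ hl']
          simp [hb, hb2]

-- the cell grid actually read by both programs (rows of mat each read at indices 0..W-1)
def pvGrid (mat : List (List Int)) : List (List Int) :=
  (List.range mat.length).map (fun i =>
    (List.range ((PySem.List.pyGet? mat 0).getD []).length).map
      (fun j => ((mat.getD i []).getD j 0)))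

lemma pvA_eq (mat : List (List Int)) :
    alpha_sinks mat
      = ((pvGrid mat).foldl pvRowA ([], ((([] : List Int)).length : Int),
          pvDictOf [])).1 := by
  simp only [alpha_sinks, pvGrid, pvRowA, pvCellA, PySem.List.pyRange_zero_natCast,
    List.foldl_map, PySem.List.pyGetD_natCast]
  simp [pvDictOf, List.zipIdx]

lemma pvMapRange {α β : Type} (g : List α) (dflt : α) (f : α → β) :
    (List.range g.length).map (fun i => f (g.getD i dflt)) = g.map f := by
  apply List.ext_getElem
  · simp
  · intro i h1 h2
    simp only [List.getElem_map, List.getElem_range]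
    rw [List.getD_eq_getElem g dflt (by simpa using h1)]

lemma pvChunk {α : Type} (g : List (List α)) (W : Nat) (hW : ∀ r ∈ g, r.length = W)
    (k : Nat) (hk : k < g.length) :
    (g.flatten.drop (k * W)).take W = g.getD k [] := by
  induction g generalizing k with
  | nil => simp at hk
  | cons r g ih =>
    have hr : r.length = W := hW r (by simp)
    cases k with
    | zero =>
      simp only [Nat.zero_mul, List.drop_zero, List.flatten_cons, List.getD_cons_zero]
      exact List.take_left' hr
    | succ k =>
      have hdrop : ((r :: g).flatten).drop ((k + 1) * W) = g.flatten.drop (k * W) := by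
        simp only [List.flatten_cons]
        rw [List.drop_append, List.drop_eq_nil_of_le
          (by rw [hr]; exact Nat.le_mul_of_pos_left W (Nat.succ_pos k))]
        rw [hr]
        simp only [List.nil_append]
        rw [Nat.succ_mul, Nat.add_sub_cancel]
      rw [hdrop, List.getD_cons_succ]
      exact ih (fun r hrg => hW r (by simp [hrg])) k (by simpa using hk)

lemma pvB_eq (mat : List (List Int)) :
    alpha_sinks_alt mat
      = (pvGrid mat).map (fun row => row.map
          (fun v => pvLook (pvDl (pvGrid mat).flatten []) v)) := by
  have hcells :
      mat.flatMap (fun row =>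
          (PySem.List.pyRange 0 (((PySem.List.pyGet? mat 0).getD []).length : Int) 1).map
            (fun j => PySem.List.pyGetD row j 0))
        = (pvGrid mat).flatten := by
    rw [List.flatMap_def]
    congr 1
    rw [pvGrid, pvMapRange mat []
      (fun row => (List.range ((PySem.List.pyGet? mat 0).getD []).length).map
        (fun j => row.getD j 0))]
    apply List.map_congr_left
    intro row _
    simp [PySem.List.pyRange_zero_natCast, List.map_map, Function.comp_def]
  have hrowlen : ∀ r ∈ pvGrid mat,
      r.length = ((PySem.List.pyGet? mat 0).getD []).length := by
    intro r hr
    simp only [pvGrid, List.mem_map] at hr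
    obtain ⟨i, _, rfl⟩ := hr
    simp
  have hglen : (pvGrid mat).length = mat.length := by simp [pvGrid]
  simp only [alpha_sinks_alt]
  rw [hcells]
  rw [PySem.List.pyRange_zero_natCast, List.map_map]
  have hmap : ∀ k ∈ List.range mat.length,
      ((fun i => (PySem.List.slice (pvGrid mat).flatten
          (some (i * (((PySem.List.pyGet? mat 0).getD []).length : Int)))
          (some ((i + 1) * (((PySem.List.pyGet? mat 0).getD []).length : Int)))).map
        (fun v => pvLook ((pvGrid mat).flatten.foldl
          (fun acc v => if v ∈ acc then acc else acc ++ [v]) []) v)) ∘ (fun k : Nat => (k : Int))) k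
      = (fun k : Nat => ((pvGrid mat).getD k []).map
          (fun v => pvLook (pvDl (pvGrid mat).flatten []) v)) k := by
    intro k hk
    have hkH : k < mat.length := List.mem_range.mp hk
    set W := ((PySem.List.pyGet? mat 0).getD []).length with hW
    have hc1 : ((k : Int) * (W : Int)) = ((k * W : Nat) : Int) := by push_cast; ring
    have hc2 : (((k : Int) + 1) * (W : Int)) = ((k * W : Nat) : Int) + (W : Int) := by
      push_cast; ring
    simp only [Function.comp_apply]
    rw [hc1, hc2, PySem.List.slice_natCast_add]
    rw [pvChunk (pvGrid mat) W hrowlen k (by omega)]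
    rfl
  rw [List.map_congr_left hmap]
  rw [← hglen, pvMapRange (pvGrid mat) []
    (fun row => row.map (fun v => pvLook (pvDl (pvGrid mat).flatten []) v))]

-- ===== VERDICT (by name: the statement is the Claim_ definition above) =====
theorem alpha_sinks_spec : Claim_equal_alpha_sinks := by
  intro mat _ _
  unfold Spec_alpha_sinks
  rw [pvA_eq, pvB_eq, pvMat (pvGrid mat) [] [] [] List.nodup_nil]
  simp
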